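-- pv_equiv track=rewrite | github.com/sassy2711/TransferableFeatures | learn_all_w's.py | get_possible_goal_states
-- ===== SOURCE A (Python) =====
-- def get_possible_goal_states(custom_map):
--     """
--     Returns a list of state indices (0..15) that are not holes ('H').
--     """
--     possible_goals = []
--     n_rows = len(custom_map)
--     n_cols = len(custom_map[0])
--     for r in range(n_rows):
--         for c in range(n_cols):
--             ch = custom_map[r][c]
--             if ch != 'H':  # allow 'S' and 'F'
--                 state_idx = r * n_cols + c
--                 possible_goals.append(state_idx)
--     return possible_goals
-- ===== SOURCE B (Python) =====
-- def get_possible_goal_states(custom_map):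
--     n_rows = len(custom_map)
--     n_cols = len(custom_map[0])
--     holes = {r * n_cols + c
--              for r, row in enumerate(custom_map)
--              for c in range(n_cols) if row[c] == 'H'}
--     return [i for i in range(n_rows * n_cols) if i not in holes]
-- ===== Notes on version B (the rewrite author's own statement) =====
-- stated objective: alternative
-- what changed: Instead of A's direct scan appending each non-'H' flat index, B computes the complement: it first builds a hash set of the hole indices, then emits every index of range(n_rows*n_cols) that is not in that set.
import Mathlib
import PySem

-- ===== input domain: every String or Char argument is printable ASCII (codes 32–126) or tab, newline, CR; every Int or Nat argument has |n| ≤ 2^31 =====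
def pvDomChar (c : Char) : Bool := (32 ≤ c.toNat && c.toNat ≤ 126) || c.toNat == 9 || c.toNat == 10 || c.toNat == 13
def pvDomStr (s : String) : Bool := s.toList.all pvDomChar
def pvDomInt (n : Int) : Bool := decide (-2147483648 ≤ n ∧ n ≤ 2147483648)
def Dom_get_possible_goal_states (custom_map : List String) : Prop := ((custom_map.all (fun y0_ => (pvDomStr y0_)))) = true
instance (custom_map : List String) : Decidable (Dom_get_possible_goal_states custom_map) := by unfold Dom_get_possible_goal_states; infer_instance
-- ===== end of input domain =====

-- B computes the complement of A's scan: it first builds a set of the hole indices,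
-- then emits every index of range(n_rows*n_cols) not in that set; same cost, a different decomposition.

-- ===== PORT A =====
def get_possible_goal_states (custom_map : List String) : List Int :=
  let n_rows : Int := custom_map.length
  let n_cols : Int := PySem.Str.len ((PySem.List.pyGet? custom_map 0).getD "")
  (PySem.List.pyRange 0 n_rows 1).foldl (fun acc r =>
    (PySem.List.pyRange 0 n_cols 1).foldl (fun acc c =>
      let ch : Char := (PySem.List.pyGet? ((PySem.List.pyGet? custom_map r).getD "").toList c).getD 'H'
      if ch ≠ 'H' then acc ++ [r * n_cols + c] else acc) acc) []

-- ===== PORT B =====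
def get_possible_goal_states_alt (custom_map : List String) : List Int :=
  let n_rows : Int := custom_map.length
  let n_cols : Int := PySem.Str.len ((PySem.List.pyGet? custom_map 0).getD "")
  let holes : PySem.Set Int :=
    (PySem.List.enumerate custom_map 0).foldl (fun s p =>
      ((PySem.List.pyRange 0 n_cols 1).filter
        (fun c => (PySem.List.pyGet? p.2.toList c).getD 'H' == 'H')).foldl
        (fun s c => PySem.Set.add s (p.1 * n_cols + c)) s) PySem.Set.empty
  (PySem.List.pyRange 0 (n_rows * n_cols) 1).filter (fun i => !(PySem.Set.contains holes i))

-- ===== PRECONDITION & SPEC =====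
-- Pre_ excludes exactly the inputs on which A raises IndexError: the empty map (custom_map[0])
-- and maps with a row shorter than the first row (custom_map[r][c] out of range).
def Pre_get_possible_goal_states (custom_map : List String) : Prop :=
  custom_map ≠ [] ∧ ∀ s ∈ custom_map, PySem.Str.len custom_map.headI ≤ PySem.Str.len s
instance (custom_map : List String) : Decidable (Pre_get_possible_goal_states custom_map) := by
  unfold Pre_get_possible_goal_states; infer_instance
def pvWitness_get_possible_goal_states : List String := ["SF", "HF"]

def Spec_get_possible_goal_states (custom_map : List String) (out : List Int) : Prop := out = get_possible_goal_states_alt custom_map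
instance (custom_map : List String) (out : List Int) : Decidable (Spec_get_possible_goal_states custom_map out) := by unfold Spec_get_possible_goal_states; infer_instance

-- ===== CLAIM (what is proved, stated in full; the proofs are below) =====
def Claim_equal_get_possible_goal_states : Prop := ∀ (custom_map : List String), Dom_get_possible_goal_states custom_map → Pre_get_possible_goal_states custom_map → Spec_get_possible_goal_states custom_map (get_possible_goal_states custom_map)

-- ===== LEMMAS AND PROOFS =====

theorem pv_decide_ne (a : Char) : (decide (a ≠ 'H')) = (a != 'H') := by
  by_cases h : a = 'H' <;> simp [h]

-- shifting the start index of enumerate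
theorem pv_enumerate_shift {α : Type} (xs : List α) (s : Int) :
    PySem.List.enumerate xs s = (PySem.List.enumerate xs 0).map (fun p => (p.1 + s, p.2)) := by
  rw [PySem.List.enumerate_eq_zipIdx_map, PySem.List.enumerate_eq_zipIdx_map, List.map_map]
  apply List.map_congr_left; intro p _; simp; omega

-- one row: filtered enumerate starting at s = filtered index range shifted by s
theorem pv_row_lemma (q : Char → Bool) (row : List Char) (s : Int) :
    ((PySem.List.enumerate row s).filter (fun p => q p.2)).map Prod.fst
      = ((PySem.List.pyRange 0 (row.length : Int) 1).filter
          (fun c => q ((PySem.List.pyGet? row c).getD 'H'))).map (fun c => s + c) := by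
  rw [pv_enumerate_shift, PySem.List.enumerate_eq_map_pyRange row 'H', List.map_map,
      List.filter_map, List.map_map]
  have hlen : PySem.List.len row = (row.length : Int) := by simp [PySem.List.len]
  rw [hlen]
  simp only [Function.comp_def, PySem.List.pyGetD]
  apply List.map_congr_left; intro c _; omega

-- main induction over the rows: per-row index blocks = flat filtered enumerate (any cell test q)
theorem pv_main (q : Char → Bool) (rows : List String) (w : Int) (hw : 0 ≤ w)
    (hlen : ∀ x ∈ rows, w ≤ (x.toList.length : Int)) (r : Int) :
    (PySem.List.enumerate rows r).flatMap (fun p =>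
        ((PySem.List.pyRange 0 w 1).filter
          (fun c => q ((PySem.List.pyGet? p.2.toList c).getD 'H'))).map (fun c => p.1 * w + c))
      = ((PySem.List.enumerate (rows.flatMap (fun x => x.toList.take w.toNat)) (r * w)).filter
          (fun p => q p.2)).map Prod.fst := by
  induction rows generalizing r with
  | nil => simp [PySem.List.enumerate_nil]
  | cons x rows ih =>
    have hx : w ≤ (x.toList.length : Int) := hlen x (by simp)
    have htake : (x.toList.take w.toNat).length = w.toNat := by
      rw [List.length_take]; omega
    rw [PySem.List.enumerate_cons, List.flatMap_cons, List.flatMap_cons,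
        PySem.List.enumerate_append, List.filter_append, List.map_append, htake]
    have hcast : (r * w + (w.toNat : Int)) = (r + 1) * w := by
      rw [Int.toNat_of_nonneg hw]; ring
    rw [hcast, ih (fun y hy => hlen y (by simp [hy])) (r + 1)]
    congr 1
    rw [pv_row_lemma, htake]
    have hfilter : List.filter (fun c => q ((PySem.List.pyGet? (x.toList.take w.toNat) c).getD 'H'))
          (PySem.List.pyRange 0 ((w.toNat : Int)) 1)
        = List.filter (fun c => q ((PySem.List.pyGet? x.toList c).getD 'H'))
          (PySem.List.pyRange 0 w 1) := by
      rw [Int.toNat_of_nonneg hw]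
      apply List.filter_congr
      intro c hc
      rw [PySem.List.mem_pyRange_one] at hc
      rw [PySem.List.pyGet?_of_nonneg _ hc.1, PySem.List.pyGet?_of_nonneg _ hc.1,
          List.getElem?_take_of_lt (by omega)]
    rw [hfilter]

-- flat filtered enumerate = filtered index range (over the flat list F)
theorem pv_flat_filter (q : Char → Bool) (F : List Char) :
    ((PySem.List.enumerate F 0).filter (fun p => q p.2)).map Prod.fst
      = (PySem.List.pyRange 0 (F.length : Int) 1).filter
          (fun i => q ((PySem.List.pyGet? F i).getD 'H')) := by
  have := pv_row_lemma q F 0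
  simpa using this

-- membership in a nested foldl of Set.add
theorem pv_mem_foldl_foldl_add {α β : Type} [BEq β] [LawfulBEq β]
    (l : List α) (g : α → List Int) (f : α → Int → β) (s : PySem.Set β) (y : β) :
    y ∈ l.foldl (fun s a => (g a).foldl (fun s c => PySem.Set.add s (f a c)) s) s
      ↔ y ∈ s ∨ ∃ a ∈ l, ∃ c ∈ g a, y = f a c := by
  induction l generalizing s with
  | nil => simp
  | cons a l ih =>
    rw [List.foldl_cons, ih, PySem.Set.mem_foldl_add]
    constructor
    · rintro (⟨h | ⟨c, hc, hy⟩⟩ | ⟨b, hb, hc⟩)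
      · exact Or.inl h
      · exact Or.inr ⟨a, by simp, c, hc, hy⟩
      · exact Or.inr ⟨b, by simp [hb], hc⟩
    · rintro (h | ⟨b, hb, c, hc, hy⟩)
      · exact Or.inl (Or.inl h)
      · rcases List.mem_cons.mp hb with rfl | hb
        · exact Or.inl (Or.inr ⟨c, hc, hy⟩)
        · exact Or.inr ⟨b, hb, c, hc, hy⟩

-- flat length under Pre_
theorem pv_flat_length (w : Int) (hw : 0 ≤ w) :
    ∀ (rows : List String), (∀ x ∈ rows, w ≤ (x.toList.length : Int)) →
      ((rows.flatMap (fun x => x.toList.take w.toNat)).length = rows.length * w.toNat)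
  | [], _ => by simp
  | x :: rows, hlen => by
    have hx : w ≤ (x.toList.length : Int) := hlen x (by simp)
    rw [List.flatMap_cons, List.length_append, List.length_take,
        pv_flat_length w hw rows (fun y hy => hlen y (by simp [hy])),
        min_eq_left (by omega : w.toNat ≤ x.toList.length), List.length_cons, Nat.succ_mul]
    omega

-- blocks over rows = filtered index range over the flattened grid (any cell test q)
theorem pv_blocks_range (q : Char → Bool) (rows : List String) (w : Int) (hw : 0 ≤ w)
    (hlen : ∀ x ∈ rows, w ≤ (x.toList.length : Int)) :
    (PySem.List.enumerate rows 0).flatMap (fun p =>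
        ((PySem.List.pyRange 0 w 1).filter
          (fun c => q ((PySem.List.pyGet? p.2.toList c).getD 'H'))).map (fun c => p.1 * w + c))
      = (PySem.List.pyRange 0 (((rows.flatMap (fun x => x.toList.take w.toNat)).length : Int)) 1).filter
          (fun i => q ((PySem.List.pyGet? (rows.flatMap (fun x => x.toList.take w.toNat)) i).getD 'H')) := by
  have h := pv_main q rows w hw hlen 0
  rw [zero_mul] at h
  rw [h, pv_flat_filter]

-- ===== VERDICT (by name: the statement is the Claim_ definition above) =====
theorem get_possible_goal_states_spec : Claim_equal_get_possible_goal_states := by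
  intro custom_map _hdom hpre
  obtain ⟨hne, hlen⟩ := hpre
  unfold Spec_get_possible_goal_states
  cases custom_map with
  | nil => exact absurd rfl hne
  | cons h t =>
    unfold get_possible_goal_states get_possible_goal_states_alt
    simp only [PySem.List.pyGet?_zero_cons, Option.getD_some, List.headI] at hlen ⊢
    set w : Int := PySem.Str.len h with hwdef
    have hw : 0 ≤ w := by rw [hwdef, PySem.Str.len_eq]; positivity
    have hlen' : ∀ x ∈ h :: t, w ≤ (x.toList.length : Int) := by
      intro x hx; have := hlen x hx; rwa [PySem.Str.len_eq] at this
    set F : List Char := (h :: t).flatMap (fun x => x.toList.take w.toNat) with hF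
    have hFlen : F.length = (h :: t).length * w.toNat :=
      pv_flat_length w hw (h :: t) hlen'
    have hT : ((h :: t).length : Int) * w = (F.length : Int) := by
      rw [hFlen]; push_cast [Int.toNat_of_nonneg hw]; ring
    -- A's side: nested foldl = filtered index range over F
    have hA : (PySem.List.pyRange 0 (((h :: t).length : Int)) 1).foldl (fun acc r =>
          (PySem.List.pyRange 0 w 1).foldl (fun acc c =>
            if ((PySem.List.pyGet? ((PySem.List.pyGet? (h :: t) r).getD "").toList c).getD 'H') ≠ 'H'
            then acc ++ [r * w + c] else acc) acc) []
        = (PySem.List.pyRange 0 ((F.length : Int)) 1).filter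
            (fun i => ((PySem.List.pyGet? F i).getD 'H') != 'H') := by
      simp only [PySem.List.foldl_append_ite, PySem.List.foldl_append_eq_flatMap,
        List.nil_append, pv_decide_ne]
      have hconv : (PySem.List.pyRange 0 (((h :: t).length : Int)) 1).flatMap (fun r =>
              List.map (HAdd.hAdd (r * w)) (List.filter
                (fun c => (PySem.List.pyGet? ((PySem.List.pyGet? (h :: t) r).getD "").toList c).getD 'H' != 'H')
                (PySem.List.pyRange 0 w 1)))
          = (PySem.List.enumerate (h :: t) 0).flatMap (fun p =>
              ((PySem.List.pyRange 0 w 1).filter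
                (fun c => ((PySem.List.pyGet? p.2.toList c).getD 'H') != 'H')).map (fun c => p.1 * w + c)) := by
        rw [PySem.List.enumerate_eq_map_pyRange (h :: t) "", PySem.List.len_eq, List.flatMap_map]
        rfl
      rw [hconv, pv_blocks_range (fun a => a != 'H') (h :: t) w hw hlen', ← hF]
    rw [hA, hT]
    -- B's side: membership in the holes set
    apply List.filter_congr
    intro i hi
    rw [PySem.List.mem_pyRange_one] at hi
    have hmem : (PySem.Set.contains ((PySem.List.enumerate (h :: t) 0).foldl (fun s p =>
            ((PySem.List.pyRange 0 w 1).filter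
              (fun c => (PySem.List.pyGet? p.2.toList c).getD 'H' == 'H')).foldl
              (fun s c => PySem.Set.add s (p.1 * w + c)) s) PySem.Set.empty) i)
        = ((PySem.List.pyGet? F i).getD 'H' == 'H') := by
      have hin : i ∈ (PySem.List.enumerate (h :: t) 0).foldl (fun s p =>
            ((PySem.List.pyRange 0 w 1).filter
              (fun c => (PySem.List.pyGet? p.2.toList c).getD 'H' == 'H')).foldl
              (fun s c => PySem.Set.add s (p.1 * w + c)) s) PySem.Set.empty
          ↔ i ∈ (PySem.List.pyRange 0 ((F.length : Int)) 1).filter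
              (fun j => ((PySem.List.pyGet? F j).getD 'H' == 'H')) := by
        rw [pv_mem_foldl_foldl_add, ← pv_blocks_range (fun a => a == 'H') (h :: t) w hw hlen']
        simp only [PySem.Set.empty, List.not_mem_nil, false_or, List.mem_flatMap, List.mem_map]
        constructor
        · rintro ⟨a, ha, c, hc, rfl⟩; exact ⟨a, ha, c, hc, rfl⟩
        · rintro ⟨a, ha, c, hc, rfl⟩; exact ⟨a, ha, c, hc, rfl⟩
      by_cases hq : ((PySem.List.pyGet? F i).getD 'H') = 'H'
      · have hq' : ((PySem.List.pyGet? F i).getD 'H' == 'H') = true := by simp [hq]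
        rw [hq']
        have hmemf : i ∈ (PySem.List.pyRange 0 ((F.length : Int)) 1).filter
            (fun j => ((PySem.List.pyGet? F j).getD 'H' == 'H')) := by
          rw [List.mem_filter, PySem.List.mem_pyRange_one]
          exact ⟨⟨hi.1, hi.2⟩, hq'⟩
        exact (PySem.Set.contains_iff _ _).mpr (hin.mpr hmemf)
      · have hq' : ((PySem.List.pyGet? F i).getD 'H' == 'H') = false := by simp [hq]
        rw [hq', ← Bool.not_eq_true]
        intro hc
        have hmemf := hin.mp ((PySem.Set.contains_iff _ _).mp hc)
        rw [List.mem_filter, hq'] at hmemf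
        exact absurd hmemf.2 (by decide)
    rw [hmem]
    rfl
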